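-- pv_equiv track=rewrite | github.com/tyler-cady/NYT-Games-AIs | Strands/strandsbot.py | is_spangram
-- ===== SOURCE A (Python) =====
-- def is_spangram(coords, grid):
--     rows = len(grid)
--     cols = len(grid[0])
--     top_edge = bottom_edge = left_edge = right_edge = False
--     for x, y in coords:
--         if x == 0:
--             top_edge = True
--         if x == rows - 1:
--             bottom_edge = True
--         if y == 0:
--             left_edge = True
--         if y == cols - 1:
--             right_edge = True
--         if (top_edge and bottom_edge) or (left_edge and right_edge):
--             return True
--     return False
-- ===== SOURCE B (Python) =====
-- def is_spangram(coords, grid):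
--     rows = len(grid)
--     cols = len(grid[0])
--     top = any(x == 0 for x, y in coords)
--     bottom = any(x == rows - 1 for x, y in coords)
--     left = any(y == 0 for x, y in coords)
--     right = any(y == cols - 1 for x, y in coords)
--     return (top and bottom) or (left and right)
-- ===== Notes on version B (the rewrite author's own statement) =====
-- stated objective: idiomatic
-- what changed: Replaced the single interleaved loop with mutable flags and early return by four independent any() scans over the coordinates combined at the end; since the flags are monotone, the early-return result equals the final-flag result.
import Mathlib
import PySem

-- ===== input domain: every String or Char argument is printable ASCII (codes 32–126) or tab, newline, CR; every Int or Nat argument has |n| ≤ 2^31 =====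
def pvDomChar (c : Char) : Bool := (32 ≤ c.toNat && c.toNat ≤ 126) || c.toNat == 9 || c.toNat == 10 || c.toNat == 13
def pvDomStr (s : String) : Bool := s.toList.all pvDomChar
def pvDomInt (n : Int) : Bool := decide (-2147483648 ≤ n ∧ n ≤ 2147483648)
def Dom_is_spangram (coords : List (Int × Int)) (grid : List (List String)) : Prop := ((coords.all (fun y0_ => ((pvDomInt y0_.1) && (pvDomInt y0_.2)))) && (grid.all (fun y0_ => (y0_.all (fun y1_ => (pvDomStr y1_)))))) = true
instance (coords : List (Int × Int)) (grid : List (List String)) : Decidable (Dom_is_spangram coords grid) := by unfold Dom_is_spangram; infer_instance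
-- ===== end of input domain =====

-- B replaces A's interleaved early-returning loop over four mutable flags by four
-- independent short-circuiting scans combined at the end (idiomatic; return value only).

-- ===== PORT A =====
-- the for-loop of A: state = the four edge flags, early return on the combined test
def is_spangram_loop (rows cols : Int) : List (Int × Int) → Bool → Bool → Bool → Bool → Bool
  | [], _, _, _, _ => false
  | (x, y) :: rest, t, b, l, r =>
    let t := t || (x == 0)
    let b := b || (x == rows - 1)
    let l := l || (y == 0)
    let r := r || (y == cols - 1)
    if (t && b) || (l && r) then true else is_spangram_loop rows cols rest t b l r

def is_spangram (coords : List (Int × Int)) (grid : List (List String)) : Bool :=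
  let rows : Int := grid.length
  let cols : Int := (grid.headD []).length   -- grid[0]; Pre_ excludes the empty grid (IndexError)
  is_spangram_loop rows cols coords false false false false

-- ===== PORT B =====
def is_spangram_alt (coords : List (Int × Int)) (grid : List (List String)) : Bool :=
  let rows : Int := grid.length
  let cols : Int := (grid.headD []).length   -- grid[0]; Pre_ excludes the empty grid (IndexError)
  let top := coords.any (fun p => p.1 == 0)
  let bottom := coords.any (fun p => p.1 == rows - 1)
  let left := coords.any (fun p => p.2 == 0)
  let right := coords.any (fun p => p.2 == cols - 1)
  (top && bottom) || (left && right)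

-- ===== PRECONDITION & SPEC =====
-- A (and B) evaluate grid[0], which raises IndexError on the empty grid; Pre_ excludes exactly that.
def Pre_is_spangram (coords : List (Int × Int)) (grid : List (List String)) : Prop := grid ≠ []
instance (coords : List (Int × Int)) (grid : List (List String)) : Decidable (Pre_is_spangram coords grid) := by unfold Pre_is_spangram; infer_instance
def pvWitness_is_spangram : (List (Int × Int)) × List (List String) := ([(0, 0), (1, 0)], [["a"], ["b"]])

def Spec_is_spangram (coords : List (Int × Int)) (grid : List (List String)) (out : Bool) : Prop := out = is_spangram_alt coords grid
instance (coords : List (Int × Int)) (grid : List (List String)) (out : Bool) : Decidable (Spec_is_spangram coords grid out) := by unfold Spec_is_spangram; infer_instance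

-- ===== CLAIM (what is proved, stated in full; the proofs are below) =====
def Claim_equal_is_spangram : Prop := ∀ (coords : List (Int × Int)) (grid : List (List String)), Dom_is_spangram coords grid → Pre_is_spangram coords grid → Spec_is_spangram coords grid (is_spangram coords grid)

-- ===== LEMMAS AND PROOFS =====
-- The loop with current flags t b l r (not yet satisfying the exit test) returns exactly
-- the final-flag combination, because the flags only ever grow.
theorem is_spangram_loop_eq (rows cols : Int) (xs : List (Int × Int)) (t b l r : Bool)
    (h : ((t && b) || (l && r)) = false) :
    is_spangram_loop rows cols xs t b l r =
      (((t || xs.any (fun p => p.1 == 0)) && (b || xs.any (fun p => p.1 == rows - 1))) ||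
       ((l || xs.any (fun p => p.2 == 0)) && (r || xs.any (fun p => p.2 == cols - 1)))) := by
  induction xs generalizing t b l r with
  | nil => simp [is_spangram_loop, h]
  | cons p rest ih =>
    obtain ⟨x, y⟩ := p
    simp only [is_spangram_loop, List.any_cons]
    by_cases hc : (((t || (x == 0)) && (b || (x == rows - 1))) ||
        ((l || (y == 0)) && (r || (y == cols - 1)))) = true
    · rw [if_pos hc]
      symm
      simp only [Bool.or_eq_true, Bool.and_eq_true] at hc ⊢
      tauto
    · rw [if_neg hc]
      rw [ih _ _ _ _ (Bool.eq_false_iff.mpr hc)]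
      simp only [Bool.or_assoc]

-- ===== VERDICT (by name: the statement is the Claim_ definition above) =====
theorem is_spangram_spec : Claim_equal_is_spangram := by
  intro coords grid _ _
  unfold Spec_is_spangram is_spangram is_spangram_alt
  simp [is_spangram_loop_eq _ _ _ false false false false rfl]
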